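-- pv_equiv track=rewrite | github.com/Saheyus/DialogueGeneratorV2 | services/context_serializer/deduplicator.py | _choose_best_path
-- ===== SOURCE A (Python) =====
-- from typing import Dict, List, Any, Set, Tuple
--
-- def _choose_best_path(paths: List[str]) -> str:
--     """Choisit le meilleur chemin parmi des chemins dupliqués.
--
--     Stratégie:
--     1. Privilégier les chemins directs (sans '.')
--     2. Si tous sont imbriqués, privilégier le plus court
--     3. Si égalité, prendre le premier alphabétiquement
--
--     Args:
--         paths: Liste de chemins dupliqués
--
--     Returns:
--         Le meilleur chemin à conserver
--     """
--     if not paths: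
--         return ""
--
--     # Séparer chemins directs et imbriqués
--     direct_paths = [p for p in paths if '.' not in p]
--     nested_paths = [p for p in paths if '.' in p]
--
--     # Privilégier les chemins directs
--     if direct_paths:
--         # Si plusieurs chemins directs, prendre le plus court puis alphabétique
--         return sorted(direct_paths, key=lambda p: (len(p), p))[0]
--
--     # Sinon, prendre le chemin imbriqué le plus court
--     return sorted(nested_paths, key=lambda p: (p.count('.'), len(p), p))[0]
-- ===== SOURCE B (Python) =====
-- def _choose_best_path(paths):
--     """Pick the best path: direct (no '.') first, then fewest dots, shortest, alphabetical."""
--     if not paths: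
--         return ""
--     return min(paths, key=lambda p: (0 if '.' not in p else 1, p.count('.'), len(p), p))
-- ===== Notes on version B (the rewrite author's own statement) =====
-- stated objective: simpler
-- what changed: Replaced the direct/nested partition plus two sorts by a single min() pass over all paths with one compound lexicographic key (direct-flag, dot-count, length, path).
import Mathlib
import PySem

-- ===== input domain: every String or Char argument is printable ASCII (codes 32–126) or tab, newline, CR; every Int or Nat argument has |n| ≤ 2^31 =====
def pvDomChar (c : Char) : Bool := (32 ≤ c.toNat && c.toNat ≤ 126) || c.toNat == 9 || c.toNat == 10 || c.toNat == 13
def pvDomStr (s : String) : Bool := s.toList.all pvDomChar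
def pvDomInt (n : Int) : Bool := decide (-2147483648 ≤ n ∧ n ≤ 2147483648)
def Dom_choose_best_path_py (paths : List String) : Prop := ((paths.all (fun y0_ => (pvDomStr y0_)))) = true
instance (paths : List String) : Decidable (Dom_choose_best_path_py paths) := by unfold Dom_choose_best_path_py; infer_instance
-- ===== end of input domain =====

-- B replaces A's partition-then-sort by one min() pass over all paths with a compound lexicographic key (simpler decomposition; return value only).

-- ===== PORT A =====
-- Python's '<' on the 3-tuple key (p.count('.'), len(p), p), written out on the components (exact tuple comparison)
def pvLt3 (a b : Int × Int × String) : Bool :=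
  decide (a.1 < b.1) || (decide (a.1 = b.1) &&
    (decide (a.2.1 < b.2.1) || (decide (a.2.1 = b.2.1) && decide (a.2.2 < b.2.2))))

-- A's nested-branch sort key: (p.count('.'), len(p), p)
def pvKeyNestedT (p : String) : Int × Int × String :=
  ((PySem.Str.count p "." : Int), PySem.Str.len p, p)

def choose_best_path_py (paths : List String) : String :=
  if paths = [] then ""
  else
    let direct_paths := paths.filter (fun p => !(PySem.Str.isIn "." p))
    let nested_paths := paths.filter (fun p => PySem.Str.isIn "." p)
    if direct_paths ≠ [] then
      -- sorted(direct_paths, key=lambda p: (len(p), p))[0]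
      PySem.List.pyGetD (PySem.List.sorted2 direct_paths (fun p => PySem.Str.len p) (fun p => p)) 0 ""
    else
      -- sorted(nested_paths, key=lambda p: (p.count('.'), len(p), p))[0] :
      -- PySem's stable insertion sort (sorted_eq_foldl_insertBy shape) with the tuple '<' above (exact)
      PySem.List.pyGetD
        (nested_paths.foldl
          (fun acc x => PySem.List.insertBy (fun a b => pvLt3 (pvKeyNestedT a) (pvKeyNestedT b)) x acc) [])
        0 ""

-- ===== PORT B =====
-- Python's '<' on B's 4-tuple key, written out on the components (exact tuple comparison)
def pvLt4 (a b : Int × Int × Int × String) : Bool :=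
  decide (a.1 < b.1) || (decide (a.1 = b.1) &&
    (decide (a.2.1 < b.2.1) || (decide (a.2.1 = b.2.1) &&
      (decide (a.2.2.1 < b.2.2.1) || (decide (a.2.2.1 = b.2.2.1) && decide (a.2.2.2 < b.2.2.2))))))

-- B's key: (0 if '.' not in p else 1, p.count('.'), len(p), p)
def pvKeyBT (p : String) : Int × Int × Int × String :=
  ((if PySem.Str.isIn "." p then 1 else 0 : Int),
   (PySem.Str.count p "." : Int), PySem.Str.len p, p)

def choose_best_path_py_alt (paths : List String) : String :=
  -- min(paths, key=...): one pass keeping the first element with the smallest key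
  match paths with
  | [] => ""
  | x :: rest => rest.foldl (fun best p => if pvLt4 (pvKeyBT p) (pvKeyBT best) then p else best) x

-- ===== PRECONDITION & SPEC =====
def Spec_choose_best_path_py (paths : List String) (out : String) : Prop := out = choose_best_path_py_alt paths
instance (paths : List String) (out : String) : Decidable (Spec_choose_best_path_py paths out) := by unfold Spec_choose_best_path_py; infer_instance

-- ===== CLAIM (what is proved, stated in full; the proofs are below) =====
def Claim_equal_choose_best_path_py : Prop := ∀ (paths : List String), Dom_choose_best_path_py paths → Spec_choose_best_path_py paths (choose_best_path_py paths)

-- ===== LEMMAS AND PROOFS =====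

-- proof-side lexicographic keys (Lex is kept out of the executable ports)
def pvL3 (t : Int × Int × String) : Lex (Int × Lex (Int × String)) :=
  toLex (t.1, toLex (t.2.1, t.2.2))
def pvL4 (t : Int × Int × Int × String) : Lex (Int × Lex (Int × Lex (Int × String))) :=
  toLex (t.1, pvL3 t.2)
def pvKD (p : String) : Lex (Int × String) := toLex (PySem.Str.len p, p)
def pvKN (p : String) : Lex (Int × Lex (Int × String)) := pvL3 (pvKeyNestedT p)
def pvKB (p : String) : Lex (Int × Lex (Int × Lex (Int × String))) := pvL4 (pvKeyBT p)

theorem pv_lt3_eq (a b : Int × Int × String) : pvLt3 a b = decide (pvL3 a < pvL3 b) := by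
  simp [pvLt3, pvL3, Prod.Lex.lt_iff]

theorem pv_lt4_eq (a b : Int × Int × Int × String) : pvLt4 a b = decide (pvL4 a < pvL4 b) := by
  simp [pvLt4, pvL4, pvL3, Prod.Lex.lt_iff]

-- a foldl of insertBy whose comparison decides 'key · < key ·' IS PySem's sorted
theorem pv_foldl_insertBy_eq_sorted {α κ : Type} [LinearOrder κ] (key : α → κ)
    (before : α → α → Bool) (h : ∀ a b, before a b = decide (key a < key b)) (xs : List α) :
    xs.foldl (fun acc x => PySem.List.insertBy before x acc) [] = PySem.List.sorted xs key := by
  have hb : before = fun a b => decide (key a < key b) := funext fun a => funext fun b => h a b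
  rw [hb]; rfl

theorem pv_sorted2_eq_sorted_kD (xs : List String) :
    PySem.List.sorted2 xs (fun p => PySem.Str.len p) (fun p => p) = PySem.List.sorted xs pvKD := by
  show xs.foldl (fun acc x => PySem.List.insertBy _ x acc) [] = _
  apply pv_foldl_insertBy_eq_sorted
  intro a b
  rcases lt_trichotomy a.length b.length with h | h | h
  · simp [pvKD, Prod.Lex.lt_iff, h, lt_asymm h, Nat.ne_of_lt h]
  · simp [pvKD, Prod.Lex.lt_iff, h]
  · simp [pvKD, Prod.Lex.lt_iff, lt_asymm h, ne_of_gt h]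
    intro h'
    exact absurd h' (not_le.mpr h)

-- B's running minimum: its result is in the list and has the (lexicographically) least key
theorem pv_min_fold {α κ : Type} [LinearOrder κ] (key : α → κ) (lt : α → α → Bool)
    (h : ∀ a b, lt a b = decide (key a < key b)) (rest : List α) (x : α) :
    (rest.foldl (fun best p => if lt p best then p else best) x) ∈ x :: rest ∧
      ∀ y ∈ x :: rest, key (rest.foldl (fun best p => if lt p best then p else best) x) ≤ key y := by
  induction rest generalizing x with
  | nil =>
    refine ⟨List.mem_cons_self, ?_⟩
    intro y hy
    simp only [List.foldl_nil]
    rcases List.mem_cons.mp hy with rfl | hc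
    · exact le_refl _
    · cases hc
  | cons p rest ih =>
    simp only [List.foldl_cons]
    by_cases hpx : key p < key x
    · have hq : lt p x = true := by rw [h]; exact decide_eq_true hpx
      rw [hq]; simp only [if_true]
      obtain ⟨ihmem, ihmin⟩ := ih p
      refine ⟨?_, ?_⟩
      · rcases List.mem_cons.mp ihmem with hm | hm
        · rw [hm]; exact List.mem_cons_of_mem _ List.mem_cons_self
        · exact List.mem_cons_of_mem _ (List.mem_cons_of_mem _ hm)
      · intro y hy
        rcases List.mem_cons.mp hy with rfl | hy'
        · exact le_trans (ihmin p List.mem_cons_self) (le_of_lt hpx)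
        · exact ihmin y hy'
    · have hq : lt p x = false := by rw [h]; exact decide_eq_false hpx
      rw [hq]; simp only [Bool.false_eq_true, if_false]
      obtain ⟨ihmem, ihmin⟩ := ih x
      refine ⟨?_, ?_⟩
      · rcases List.mem_cons.mp ihmem with hm | hm
        · rw [hm]; exact List.mem_cons_self
        · exact List.mem_cons_of_mem _ (List.mem_cons_of_mem _ hm)
      · intro y hy
        rcases List.mem_cons.mp hy with rfl | hy'
        · exact ihmin y List.mem_cons_self
        rcases List.mem_cons.mp hy' with rfl | hy''
        · exact le_trans (ihmin x List.mem_cons_self) (le_of_not_gt hpx)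
        · exact ihmin y (List.mem_cons_of_mem _ hy'')

-- if sub does not occur in s, the counting loop never fires
theorem pv_count_go_of_not_infix (sub : List Char) :
    ∀ (fuel : Nat) (s : List Char) (acc : Nat), ¬ sub <:+: s →
      PySem.Chars.count.go sub fuel s acc = acc := by
  intro fuel
  induction fuel with
  | zero => intro s acc _; cases s <;> rfl
  | succ n ih =>
    intro s acc h
    cases s with
    | nil => rfl
    | cons c t =>
      have hp : sub.isPrefixOf (c :: t) = false := by
        by_contra hc
        have : sub.isPrefixOf (c :: t) = true := by
          cases hq : sub.isPrefixOf (c :: t) <;> simp_all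
        exact h ((List.isPrefixOf_iff_prefix.mp this).isInfix)
      have ht : ¬ sub <:+: t := fun hi => h (hi.trans (List.suffix_cons c t).isInfix)
      simp only [PySem.Chars.count.go, hp, Bool.false_eq_true, if_false]
      exact ih t acc ht

theorem pv_count_dot_zero (p : String) (h : PySem.Str.isIn "." p = false) :
    PySem.Str.count p "." = 0 := by
  have hni : ¬ ('.' :: []) <:+: p.toList := by
    intro hi
    have h2 := (PySem.Str.isIn_iff_infix "." p).mpr (by simpa using hi)
    rw [show PySem.Str.isIn "." p = PySem.Chars.isIn ['.'] p.toList from rfl] at h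
    simp [h] at h2
  show PySem.Chars.count p.toList ".".toList = 0
  have hdot : ".".toList = ['.'] := rfl
  rw [hdot]
  simp only [PySem.Chars.count, List.isEmpty_cons, Bool.false_eq_true, if_false]
  exact pv_count_go_of_not_infix ['.'] p.toList.length p.toList 0 hni

-- equal first components: lexicographic ≤ reduces to the second component
theorem pv_lex_le_same {β : Type} [Preorder β] (a : Int) (x y : β) :
    toLex (a, x) ≤ toLex (a, y) ↔ x ≤ y := by
  simp [Prod.Lex.le_iff]

theorem pv_keyB_inj (p q : String) (h : pvKB p = pvKB q) : p = q := by
  unfold pvKB pvL4 pvL3 pvKeyBT at h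
  have h1 := congrArg (fun z => (ofLex ((ofLex ((ofLex z).2)).2)).2) h
  simpa using h1

theorem pv_keyB_direct (p : String) (h : PySem.Str.isIn "." p = false) :
    pvKB p = toLex (0, toLex (0, pvKD p)) := by
  unfold pvKB pvL4 pvL3 pvKeyBT pvKD
  rw [pv_count_dot_zero p h, h]
  simp

theorem pv_keyB_nested (p : String) (h : PySem.Str.isIn "." p = true) :
    pvKB p = toLex (1, pvKN p) := by
  unfold pvKB pvL4 pvKN pvKeyBT pvKeyNestedT
  rw [h]
  simp

-- ===== VERDICT (by name: the statement is the Claim_ definition above) =====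
theorem choose_best_path_py_spec : Claim_equal_choose_best_path_py := by
  unfold Claim_equal_choose_best_path_py
  intro paths _
  unfold Spec_choose_best_path_py choose_best_path_py choose_best_path_py_alt
  by_cases hnil : paths = []
  · simp [hnil]
  · obtain ⟨x, rest, rfl⟩ : ∃ x rest, paths = x :: rest := by
      cases paths with
      | nil => exact absurd rfl hnil
      | cons a b => exact ⟨a, b, rfl⟩
    simp only [hnil, if_false, ne_eq]
    -- B's running minimum
    obtain ⟨hmmem, hmmin'⟩ :=
      pv_min_fold pvKB (fun p q => pvLt4 (pvKeyBT p) (pvKeyBT q))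
        (fun a b => pv_lt4_eq (pvKeyBT a) (pvKeyBT b)) rest x
    set m := rest.foldl (fun best p => if pvLt4 (pvKeyBT p) (pvKeyBT best) then p else best) x with hmdef
    have hmmin : ∀ y ∈ x :: rest, pvKB m ≤ pvKB y := hmmin'
    by_cases hd : (x :: rest).filter (fun p => !(PySem.Str.isIn "." p)) = []
    · -- all paths nested
      simp only [hd, not_true_eq_false, if_false]
      have hall : ∀ p ∈ x :: rest, PySem.Str.isIn "." p = true := by
        intro p hp
        have := List.filter_eq_nil_iff.mp hd p hp
        simpa using this
      have hfe : (x :: rest).filter (fun p => PySem.Str.isIn "." p) = x :: rest :=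
        List.filter_eq_self.mpr (fun a ha => by simpa using hall a ha)
      rw [hfe, pv_foldl_insertBy_eq_sorted pvKN _
        (fun a b => pv_lt3_eq (pvKeyNestedT a) (pvKeyNestedT b)) (x :: rest)]
      obtain ⟨m1, t, hs⟩ : ∃ m1 t, PySem.List.sorted (x :: rest) pvKN = m1 :: t := by
        cases hq : PySem.List.sorted (x :: rest) pvKN with
        | nil => exact absurd ((PySem.List.sorted_eq_nil_iff _ _ _).mp hq) hnil
        | cons a b => exact ⟨a, b, rfl⟩
      rw [hs, PySem.List.pyGetD_zero_cons]
      have hm1mem : m1 ∈ x :: rest := by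
        have : m1 ∈ PySem.List.sorted (x :: rest) pvKN := by rw [hs]; exact List.mem_cons_self
        rwa [PySem.List.mem_sorted] at this
      have hmin1 : ∀ y ∈ x :: rest, pvKN m1 ≤ pvKN y :=
        PySem.List.key_head_sorted_le (x :: rest) pvKN hs
      have h1 : pvKB m ≤ pvKB m1 := hmmin m1 hm1mem
      have h2 : pvKB m1 ≤ pvKB m := by
        rw [pv_keyB_nested m (hall m hmmem), pv_keyB_nested m1 (hall m1 hm1mem), pv_lex_le_same]
        exact hmin1 m hmmem
      exact (pv_keyB_inj m m1 (le_antisymm h1 h2)).symm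
    · -- direct paths exist
      simp only [hd, not_false_eq_true, if_true]
      rw [pv_sorted2_eq_sorted_kD]
      obtain ⟨m1, t, hs⟩ : ∃ m1 t,
          PySem.List.sorted ((x :: rest).filter (fun p => !(PySem.Str.isIn "." p))) pvKD = m1 :: t := by
        cases hq : PySem.List.sorted ((x :: rest).filter (fun p => !(PySem.Str.isIn "." p))) pvKD with
        | nil => exact absurd ((PySem.List.sorted_eq_nil_iff _ _ _).mp hq) hd
        | cons a b => exact ⟨a, b, rfl⟩
      rw [hs, PySem.List.pyGetD_zero_cons]
      have hm1f : m1 ∈ (x :: rest).filter (fun p => !(PySem.Str.isIn "." p)) := by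
        have : m1 ∈ PySem.List.sorted ((x :: rest).filter (fun p => !(PySem.Str.isIn "." p))) pvKD := by
          rw [hs]; exact List.mem_cons_self
        rwa [PySem.List.mem_sorted] at this
      have hm1mem : m1 ∈ x :: rest := (List.mem_filter.mp hm1f).1
      have hm1dir : PySem.Str.isIn "." m1 = false := by
        have := (List.mem_filter.mp hm1f).2; simpa using this
      have hmin1 : ∀ y ∈ (x :: rest).filter (fun p => !(PySem.Str.isIn "." p)),
          pvKD m1 ≤ pvKD y :=
        PySem.List.key_head_sorted_le _ pvKD hs
      -- m is itself direct: its key is ≤ the key of a direct path whose flag is 0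
      have hmdir : PySem.Str.isIn "." m = false := by
        by_contra hc
        have hct : PySem.Str.isIn "." m = true := by cases hq : PySem.Str.isIn "." m <;> simp_all
        have hle : pvKB m ≤ pvKB m1 := hmmin m1 hm1mem
        rw [pv_keyB_nested m hct, pv_keyB_direct m1 hm1dir] at hle
        rcases Prod.Lex.le_iff.mp hle with h | ⟨h, _⟩ <;> simp at h
      have hmf : m ∈ (x :: rest).filter (fun p => !(PySem.Str.isIn "." p)) :=
        List.mem_filter.mpr ⟨hmmem, by simpa [PySem.Str.isIn] using hmdir⟩
      have h1 : pvKB m ≤ pvKB m1 := hmmin m1 hm1mem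
      have h2 : pvKB m1 ≤ pvKB m := by
        rw [pv_keyB_direct m hmdir, pv_keyB_direct m1 hm1dir, pv_lex_le_same, pv_lex_le_same]
        exact hmin1 m hmf
      exact (pv_keyB_inj m m1 (le_antisymm h1 h2)).symm
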